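-- pv_equiv track=rewrite | github.com/tensorflow/models | research/neural_gpu/neural_gpu_trainer.py | zero_split
-- ===== SOURCE A (Python) =====
-- def zero_split(tok_list, append=None):
--   """Split tok_list (list of ints) on 0s, append int to all parts if given."""
--   res, cur, l = [], [], 0
--   for tok in tok_list:
--     if tok == 0:
--       if append is not None:
--         cur.append(append)
--       res.append(cur)
--       l = max(l, len(cur))
--       cur = []
--     else:
--       cur.append(tok)
--   if append is not None:
--     cur.append(append)
--   res.append(cur)
--   l = max(l, len(cur))
--   return res, l
-- ===== SOURCE B (Python) =====
-- def zero_split(tok_list, append=None):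
--   """Split tok_list (list of ints) on 0s, append int to all parts if given."""
--   rparts = [[]]
--   for tok in reversed(tok_list):
--     if tok == 0:
--       rparts.append([])
--     else:
--       rparts[-1].append(tok)
--   parts = [p[::-1] for p in reversed(rparts)]
--   if append is not None:
--     parts = [p + [append] for p in parts]
--   return parts, max(len(p) for p in parts)
-- ===== Notes on version B (the rewrite author's own statement) =====
-- stated objective: alternative
-- what changed: B traverses the tokens right-to-left, building the list of parts directly by consing onto its front (no running current-part buffer or running max), then applies the optional append and computes the maximum length in two separate passes, instead of A's single forward loop that interleaves accumulation, appending and max-tracking.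
import Mathlib
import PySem

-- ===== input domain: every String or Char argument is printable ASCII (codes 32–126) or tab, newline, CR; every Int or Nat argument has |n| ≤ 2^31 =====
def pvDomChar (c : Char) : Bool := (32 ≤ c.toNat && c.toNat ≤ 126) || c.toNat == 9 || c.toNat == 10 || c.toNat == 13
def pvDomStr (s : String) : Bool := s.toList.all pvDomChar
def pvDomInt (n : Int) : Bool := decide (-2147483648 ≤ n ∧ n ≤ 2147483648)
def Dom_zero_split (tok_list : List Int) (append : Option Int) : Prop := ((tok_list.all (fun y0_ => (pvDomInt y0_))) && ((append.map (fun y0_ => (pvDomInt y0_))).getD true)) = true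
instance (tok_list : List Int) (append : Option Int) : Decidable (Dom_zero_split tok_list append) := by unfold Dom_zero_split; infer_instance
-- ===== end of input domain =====

-- B builds the parts by a backward pass that appends to the last (reversed) part and reverses at
-- the end — no running current-part buffer or running max; append and max are separate passes.
-- Objective: alternative decomposition (same O(n) cost).

-- ===== PORT A =====
-- 'if append is not None: cur.append(append)'
def zsApp (append : Option Int) (cur : List Int) : List Int :=
  match append with
  | some a => cur ++ [a]
  | none => cur

-- the 'for tok in tok_list' loop over the state (res, cur, l)
def zsGo (append : Option Int) : List Int → List (List Int) × List Int × Int → List (List Int) × List Int × Int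
  | [], s => s
  | tok :: ts, (res, cur, l) =>
      if tok = 0 then
        let cur' := zsApp append cur
        zsGo append ts (res ++ [cur'], [], max l (cur'.length : Int))
      else
        zsGo append ts (res, cur ++ [tok], l)

def zero_split (tok_list : List Int) (append : Option Int) : List (List Int) × Int :=
  let s := zsGo append tok_list ([], [], 0)
  let cur := zsApp append s.2.1
  (s.1 ++ [cur], max s.2.2 ((cur.length : Int)))

-- ===== PORT B =====
-- 'rparts[-1].append(tok)': modify the last element of a list (hand port, exact on every list)
def modLast (f : List Int → List Int) : List (List Int) → List (List Int)
  | [] => []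
  | [x] => [f x]
  | x :: xs => x :: modLast f xs

-- 'for tok in reversed(tok_list)' building rparts (parts reversed, each part reversed)
def zsRParts (tok_list : List Int) : List (List Int) :=
  tok_list.reverse.foldl
    (fun rparts tok => if tok = 0 then rparts ++ [[]] else modLast (fun p => p ++ [tok]) rparts)
    [[]]

def zero_split_alt (tok_list : List Int) (append : Option Int) : List (List Int) × Int :=
  let rparts := zsRParts tok_list
  -- '[p[::-1] for p in reversed(rparts)]'
  let parts := rparts.reverse.map List.reverse
  let parts :=
    match append with
    | some a => parts.map (fun p => p ++ [a])
    | none => parts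
  -- 'max(len(p) for p in parts)'; parts is never empty, the [] branch is unreachable
  (parts,
    match parts.map (fun p => (p.length : Int)) with
    | [] => 0
    | x :: xs => xs.foldl max x)

-- ===== PRECONDITION & SPEC =====
def Spec_zero_split (tok_list : List Int) (append : Option Int) (out : List (List Int) × Int) : Prop := out = zero_split_alt tok_list append
instance (tok_list : List Int) (append : Option Int) (out : List (List Int) × Int) : Decidable (Spec_zero_split tok_list append out) := by unfold Spec_zero_split; infer_instance

-- ===== CLAIM (what is proved, stated in full; the proofs are below) =====
def Claim_equal_zero_split : Prop := ∀ (tok_list : List Int) (append : Option Int), Dom_zero_split tok_list append → Spec_zero_split tok_list append (zero_split tok_list append)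

-- ===== LEMMAS AND PROOFS =====

-- proof-side characterisation: the parts as a right fold consing at the front
def zsParts (tok_list : List Int) : List (List Int) :=
  tok_list.foldr
    (fun tok parts => if tok = 0 then [] :: parts else parts.modifyHead (fun p => tok :: p))
    [[]]

theorem zsParts_cons (tok : Int) (ts : List Int) :
    zsParts (tok :: ts) =
      if tok = 0 then [] :: zsParts ts else (zsParts ts).modifyHead (fun p => tok :: p) := by
  simp [zsParts]

theorem zsParts_ne_nil (ts : List Int) : zsParts ts ≠ [] := by
  induction ts with
  | nil => simp [zsParts]
  | cons t ts ih =>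
      rw [zsParts_cons]
      split_ifs
      · simp
      · cases h : zsParts ts with
        | nil => exact absurd h ih
        | cons p ps => simp [h]

theorem modifyHead_id_int (xs : List (List Int)) : xs.modifyHead (fun p => p) = xs := by
  cases xs <;> simp

theorem modifyHead_pre (cur : List Int) (tok : Int) (xs : List (List Int)) :
    (xs.modifyHead (fun p => tok :: p)).modifyHead (fun p => cur ++ p)
      = xs.modifyHead (fun p => (cur ++ [tok]) ++ p) := by
  cases xs <;> simp

theorem modifyHead_append_left (g : List Int → List Int) (ys zs : List (List Int)) (h : ys ≠ []) :
    (ys ++ zs).modifyHead g = ys.modifyHead g ++ zs := by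
  cases ys with
  | nil => exact absurd rfl h
  | cons y ys => simp

theorem rev_modLast (tok : Int) (rp : List (List Int)) :
    ((modLast (fun p => p ++ [tok]) rp).map List.reverse).reverse
      = ((rp.map List.reverse).reverse).modifyHead (fun p => tok :: p) := by
  induction rp with
  | nil => simp [modLast]
  | cons x xs ih =>
      cases xs with
      | nil => simp [modLast]
      | cons y ys =>
          rw [show modLast (fun p => p ++ [tok]) (x :: y :: ys) = x :: modLast (fun p => p ++ [tok]) (y :: ys) from rfl]
          simp only [List.map_cons, List.reverse_cons]
          rw [ih]
          rw [modifyHead_append_left _ _ _ (by simp)]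
          simp

theorem rparts_eq (xs : List Int) :
    ((zsRParts xs).map List.reverse).reverse = zsParts xs := by
  unfold zsRParts zsParts
  rw [List.foldl_reverse]
  induction xs with
  | nil => simp
  | cons t ts ih =>
      simp only [List.foldr_cons]
      by_cases h : t = 0
      · simp only [h, if_true, ← ih]
        simp
      · simp only [if_neg h, ← ih]
        exact rev_modLast t _

theorem rparts_eq' (xs : List Int) :
    (zsRParts xs).reverse.map List.reverse = zsParts xs := by
  rw [← rparts_eq xs, List.map_reverse]

theorem zsGo_spec (append : Option Int) (ts : List Int) (res : List (List Int)) (cur : List Int) (l : Int) :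
    ((zsGo append ts (res, cur, l)).1 ++ [zsApp append (zsGo append ts (res, cur, l)).2.1],
      max (zsGo append ts (res, cur, l)).2.2 (((zsApp append (zsGo append ts (res, cur, l)).2.1).length : Int)))
    = (res ++ (((zsParts ts).modifyHead (fun p => cur ++ p)).map (zsApp append)),
       (((zsParts ts).modifyHead (fun p => cur ++ p)).map (zsApp append)).foldl
         (fun m p => max m ((p.length : Int))) l) := by
  induction ts generalizing res cur l with
  | nil => simp [zsGo, zsParts]
  | cons tok ts ih =>
      rw [zsParts_cons]
      by_cases h : tok = 0
      · simp only [zsGo, h, if_true]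
        rw [ih]
        simp [modifyHead_id_int]
      · simp only [zsGo, if_neg h]
        rw [ih, ← modifyHead_pre]

theorem map_zsApp (append : Option Int) (parts : List (List Int)) :
    (match append with
      | some a => parts.map (fun p => p ++ [a])
      | none => parts) = parts.map (zsApp append) := by
  cases append with
  | none => exact (List.map_id parts).symm
  | some a => rfl

theorem max_eq_foldl (P : List (List Int)) (hne : P ≠ []) :
    (match P.map (fun p => (p.length : Int)) with
      | [] => (0 : Int)
      | x :: xs => xs.foldl max x)
    = P.foldl (fun m p => max m ((p.length : Int))) 0 := by
  cases P with
  | nil => exact absurd rfl hne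
  | cons p ps =>
      simp only [List.map_cons, List.foldl_cons]
      rw [List.foldl_map]
      have : max (0 : Int) ((p.length : Int)) = (p.length : Int) := by
        simp
      rw [this]

-- ===== VERDICT (by name: the statement is the Claim_ definition above) =====
theorem zero_split_spec : Claim_equal_zero_split := by
  intro tok_list append _
  show zero_split tok_list append = zero_split_alt tok_list append
  have h := zsGo_spec append tok_list [] [] 0
  simp only [List.nil_append] at h
  have hmod : (zsParts tok_list).modifyHead (fun p : List Int => p) = zsParts tok_list := by
    cases zsParts tok_list <;> simp
  rw [hmod] at h
  have hne : (zsParts tok_list).map (zsApp append) ≠ [] := by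
    simp [zsParts_ne_nil]
  unfold zero_split zero_split_alt
  simp only [rparts_eq', map_zsApp]
  rw [max_eq_foldl _ hne, h]
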